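-- pv_equiv track=rewrite | github.com/jeng-a-yo/Project-Euler-Solution | Python Solution/ProjectEuler37.py | spilt
-- ===== SOURCE A (Python) =====
-- def spilt(number):
--     all_results = []
--     for a in range(1, len(str(number))):  # remove right
--         all_results.append(
--             int("".join(list(str(number))[:len(str(number)) - a])))
--
--     for b in range(len(str(number))):  # remove left
--         all_results.append(int("".join(list(str(number))[b:len(str(number))])))
--
--     return all_results
-- ===== SOURCE B (Python) =====
-- def spilt(number):
--     rights = []
--     v = number // 10
--     while v > 0:
--         rights.append(v)
--         v //= 10
--     d = len(rights) + 1
--     lefts = [number % 10 ** k for k in range(d, 0, -1)]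
--     return rights + lefts
-- ===== Notes on version B (the rewrite author's own statement) =====
-- stated objective: alternative
-- what changed: Replaces the per-truncation str()/slice/int() round-trips with pure integer arithmetic: right-truncations by iterated floor division, left-truncations by taking the number modulo powers of ten.
import Mathlib
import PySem

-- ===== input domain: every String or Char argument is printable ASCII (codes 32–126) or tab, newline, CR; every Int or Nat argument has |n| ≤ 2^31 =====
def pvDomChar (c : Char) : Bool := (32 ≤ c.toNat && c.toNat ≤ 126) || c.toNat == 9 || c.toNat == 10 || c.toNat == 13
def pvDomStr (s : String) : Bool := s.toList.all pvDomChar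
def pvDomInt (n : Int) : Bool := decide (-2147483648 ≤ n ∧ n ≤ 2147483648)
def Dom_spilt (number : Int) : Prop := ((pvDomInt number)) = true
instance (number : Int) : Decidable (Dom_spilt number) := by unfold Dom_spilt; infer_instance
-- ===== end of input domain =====

-- B replaces A's per-truncation str()/slice/int() round-trips with pure integer arithmetic
-- (iterated floor division for the right-truncations, number mod 10**k for the left ones).

-- ===== PORT A =====
-- literal port of A; int(...) is PySem.Int.ofChars?; the '.getD 0' stands where Python would
-- raise ValueError (only reachable for negative numbers, which Pre_spilt excludes)
def spilt (number : Int) : List Int :=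
  let firstLoop :=
    (PySem.List.pyRange 1 (PySem.Chars.len (PySem.Int.toChars number)) 1).foldl
      (fun acc a =>
        acc ++ [(PySem.Int.ofChars? (PySem.List.slice (PySem.Int.toChars number) none
          (some (PySem.Chars.len (PySem.Int.toChars number) - a)))).getD 0]) []
  (PySem.List.pyRange 0 (PySem.Chars.len (PySem.Int.toChars number)) 1).foldl
    (fun acc b =>
      acc ++ [(PySem.Int.ofChars? (PySem.List.slice (PySem.Int.toChars number) (some b)
        (some (PySem.Chars.len (PySem.Int.toChars number))))).getD 0]) firstLoop

-- ===== PORT B =====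
-- the 'while v > 0' loop of Source B
def spiltRights (v : Int) : List Int :=
  if 0 < v then v :: spiltRights (PySem.Int.floordiv v 10) else []
termination_by v.toNat
decreasing_by
  rw [PySem.Int.floordiv_eq_ediv_of_pos (by norm_num)]
  omega

def spilt_alt (number : Int) : List Int :=
  let rights := spiltRights (PySem.Int.floordiv number 10)
  let d : Int := (rights.length : Int) + 1
  rights ++ (PySem.List.pyRange d 0 (-1)).map (fun k => PySem.Int.mod number (10 ^ k.toNat))

-- ===== PRECONDITION & SPEC =====
-- Pre_ excludes exactly the negative numbers: on every negative input A raises ValueError,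
-- because the last right-truncation slice consists of the minus sign alone and int() rejects it.
def Pre_spilt (number : Int) : Prop := 0 ≤ number
instance (number : Int) : Decidable (Pre_spilt number) := by unfold Pre_spilt; infer_instance
def pvWitness_spilt : Int := (370)

def Spec_spilt (number : Int) (out : List Int) : Prop := out = spilt_alt number
instance (number : Int) (out : List Int) : Decidable (Spec_spilt number out) := by unfold Spec_spilt; infer_instance

-- ===== CLAIM (what is proved, stated in full; the proofs are below) =====
def Claim_equal_spilt : Prop := ∀ (number : Int), Dom_spilt number → Pre_spilt number → Spec_spilt number (spilt number)

-- ===== LEMMAS AND PROOFS =====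

-- ---- decimal digit characters of a natural number (most significant first) ----
def decChars (m : Nat) : List Char :=
  if m < 10 then [Nat.digitChar m] else decChars (m / 10) ++ [Nat.digitChar (m % 10)]
termination_by m
decreasing_by exact Nat.div_lt_self (by omega) (by norm_num)

theorem decChars_lt {m : Nat} (h : m < 10) : decChars m = [Nat.digitChar m] := by
  rw [decChars]; simp [h]

theorem decChars_ge {m : Nat} (h : 10 ≤ m) :
    decChars m = decChars (m / 10) ++ [Nat.digitChar (m % 10)] := by
  rw [decChars]; simp [Nat.not_lt.mpr h]

theorem length_decChars_pos (m : Nat) : 1 ≤ (decChars m).length := by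
  by_cases h : m < 10
  · simp [decChars_lt h]
  · simp [decChars_ge (Nat.not_lt.mp h)]

theorem toDigitsCore_eq_decChars :
    ∀ (f m : Nat) (l : List Char), m < f → Nat.toDigitsCore 10 f m l = decChars m ++ l := by
  intro f
  induction f with
  | zero => intro m l h; omega
  | succ f ih =>
    intro m l h
    by_cases h10 : m < 10
    · have hdiv : m / 10 = 0 := Nat.div_eq_of_lt h10
      have hm : m % 10 = m := Nat.mod_eq_of_lt h10
      simp [Nat.toDigitsCore, hdiv, decChars_lt h10, hm]
    · have h10' : 10 ≤ m := Nat.not_lt.mp h10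
      have hne : m / 10 ≠ 0 := by omega
      have hlt : m / 10 < f := by
        have := Nat.div_lt_self (by omega : 0 < m) (by norm_num : 1 < 10)
        omega
      rw [Nat.toDigitsCore]
      simp only [hne]
      rw [ih (m / 10) _ hlt, decChars_ge h10']
      simp

theorem toDigits_eq_decChars (m : Nat) : Nat.toDigits 10 m = decChars m := by
  have := toDigitsCore_eq_decChars (m + 1) m [] (by omega)
  simpa [Nat.toDigits] using this

theorem toChars_eq_decChars (n : Int) (h : 0 ≤ n) :
    PySem.Int.toChars n = decChars n.toNat := by
  rw [PySem.Int.toChars]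
  simp [Int.not_lt.mpr h, toDigits_eq_decChars]

-- ---- digit characters ----
theorem digitChar_isDigit {k : Nat} (h : k < 10) : (Nat.digitChar k).isDigit = true := by
  interval_cases k <;> decide

theorem digitChar_toNat {k : Nat} (h : k < 10) : (Nat.digitChar k).toNat - '0'.toNat = k := by
  interval_cases k <;> decide

theorem digitChar_toNat' {k : Nat} (h : k < 10) : (Nat.digitChar k).toNat = k + 48 := by
  interval_cases k <;> decide

theorem decChars_all_digit : ∀ m, ∀ c ∈ decChars m, c.isDigit = true := by
  intro m
  induction m using Nat.strong_induction_on with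
  | _ m ih =>
    by_cases h : m < 10
    · rw [decChars_lt h]
      intro c hc
      simp at hc
      subst hc
      exact digitChar_isDigit h
    · rw [decChars_ge (Nat.not_lt.mp h)]
      intro c hc
      rcases List.mem_append.mp hc with hc | hc
      · exact ih (m / 10) (Nat.div_lt_self (by omega) (by norm_num)) c hc
      · simp at hc
        subst hc
        exact digitChar_isDigit (Nat.mod_lt _ (by norm_num))

-- ---- the value read back from a digit string ----
def valFrom (a : Nat) (ds : List Char) : Nat :=
  ds.foldl (fun acc c => acc * 10 + (c.toNat - '0'.toNat)) a

theorem valFrom_append (a : Nat) (ds : List Char) (c : Char) :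
    valFrom a (ds ++ [c]) = valFrom a ds * 10 + (c.toNat - '0'.toNat) := by
  simp [valFrom, List.foldl_append]

theorem valFrom_decChars : ∀ m a, valFrom a (decChars m) = a * 10 ^ (decChars m).length + m := by
  intro m
  induction m using Nat.strong_induction_on with
  | _ m ih =>
    intro a
    by_cases h : m < 10
    · rw [decChars_lt h]
      simp [valFrom, digitChar_toNat' h]
    · have h' : 10 ≤ m := Nat.not_lt.mp h
      rw [decChars_ge h', valFrom_append,
        ih (m / 10) (Nat.div_lt_self (by omega) (by norm_num)) a,
        digitChar_toNat (Nat.mod_lt _ (by norm_num))]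
      have : (decChars (m / 10) ++ [Nat.digitChar (m % 10)]).length
          = (decChars (m / 10)).length + 1 := by simp
      rw [this, pow_succ]
      have hm : m / 10 * 10 + m % 10 = m := by omega
      ring_nf
      omega

theorem valFrom_decChars_zero (m : Nat) : valFrom 0 (decChars m) = m := by
  simpa using valFrom_decChars m 0

-- ---- take / drop of the digit string ----
theorem take_decChars : ∀ (a m : Nat), a < (decChars m).length →
    (decChars m).take ((decChars m).length - a) = decChars (m / 10 ^ a) := by
  intro a
  induction a with
  | zero => intro m _; simp [List.take_of_length_le]
  | succ a ih =>
    intro m h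
    have h2 : 2 ≤ (decChars m).length := by omega
    have h10 : 10 ≤ m := by
      by_contra hlt
      rw [decChars_lt (by omega)] at h2
      simp at h2
    rw [decChars_ge h10] at h ⊢
    have hlenP : (decChars (m / 10) ++ [Nat.digitChar (m % 10)]).length
        = (decChars (m / 10)).length + 1 := by simp
    rw [hlenP] at h ⊢
    have ha : a < (decChars (m / 10)).length := by omega
    rw [show (decChars (m / 10)).length + 1 - (a + 1) = (decChars (m / 10)).length - a from by
      omega]
    rw [List.take_append_of_le_length (by omega)]
    rw [ih (m / 10) ha]
    rw [Nat.div_div_eq_div_mul, pow_succ]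
    ring_nf

theorem mod_ten_step (q r s : Nat) : r < 10 → (10 * q + r) % (10 * s) = 10 * (q % s) + r := by
  intro hr
  rcases Nat.eq_zero_or_pos s with rfl | hs
  · simp
  · conv_lhs => rw [show q = s * (q / s) + q % s from (Nat.div_add_mod q s).symm]
    rw [show 10 * (s * (q / s) + q % s) + r = (10 * (q % s) + r) + (q / s) * (10 * s) from by ring]
    rw [Nat.add_mul_mod_self_right]
    exact Nat.mod_eq_of_lt (by have := Nat.mod_lt q hs; omega)

theorem drop_valFrom : ∀ (m b : Nat), b < (decChars m).length →
    valFrom 0 ((decChars m).drop b) = m % 10 ^ ((decChars m).length - b) := by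
  intro m
  induction m using Nat.strong_induction_on with
  | _ m ih =>
    intro b hb
    by_cases h : m < 10
    · rw [decChars_lt h] at hb ⊢
      simp at hb
      subst hb
      simp [valFrom, digitChar_toNat' h, Nat.mod_eq_of_lt h]
    · have h' : 10 ≤ m := Nat.not_lt.mp h
      rw [decChars_ge h'] at hb ⊢
      have hlen : (decChars (m / 10) ++ [Nat.digitChar (m % 10)]).length
          = (decChars (m / 10)).length + 1 := by simp
      rw [hlen] at hb ⊢
      have hble : b ≤ (decChars (m / 10)).length := by omega
      rw [List.drop_append_of_le_length hble, valFrom_append,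
        digitChar_toNat (Nat.mod_lt _ (by norm_num))]
      by_cases hcase : b < (decChars (m / 10)).length
      · rw [ih (m / 10) (Nat.div_lt_self (by omega) (by norm_num)) b hcase]
        have : (decChars (m / 10)).length + 1 - b = ((decChars (m / 10)).length - b) + 1 := by
          omega
        rw [this, pow_succ]
        calc m / 10 % 10 ^ ((decChars (m / 10)).length - b) * 10 + m % 10
            = 10 * (m / 10 % 10 ^ ((decChars (m / 10)).length - b)) + m % 10 := by ring
          _ = (10 * (m / 10) + m % 10) % (10 * 10 ^ ((decChars (m / 10)).length - b)) := by
              rw [mod_ten_step _ _ _ (Nat.mod_lt _ (by norm_num))]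
          _ = m % (10 ^ ((decChars (m / 10)).length - b) * 10) := by
              rw [show 10 * (m / 10) + m % 10 = m from by omega, mul_comm]
      · have hbeq : b = (decChars (m / 10)).length := by omega
        subst hbeq
        simp [valFrom]

-- ---- parsing a digit string with Python's int(): clone of the private digit reader ----
def dvGo : List Char → Bool → Nat → Option Nat
  | [], afterDigit, acc => if afterDigit = true then some acc else none
  | c :: rest, afterDigit, acc =>
    if c.isDigit = true then dvGo rest true (acc * 10 + (c.toNat - '0'.toNat))
    else
      if c = '_' ∧ afterDigit = true then
        match rest with
        | d :: _tail => if d.isDigit = true then dvGo rest false acc else none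
        | [] => none
      else none

theorem isIntSpace_of_digit (c : Char) (hc : c.isDigit = true) :
    PySem.Int.isIntSpace c = false := by
  simp [PySem.Int.isIntSpace, Char.isDigit] at *
  refine ⟨⟨⟨⟨⟨?_, ?_⟩, ?_⟩, ?_⟩, ?_⟩, ?_⟩ <;> (rintro rfl; simp_all)

theorem dropWhile_eq_self_of_digits (l : List Char) (h : ∀ d ∈ l, d.isDigit = true) :
    List.dropWhile PySem.Int.isIntSpace l = l := by
  cases l with
  | nil => rfl
  | cons c t => simp [isIntSpace_of_digit c (h c (by simp))]

theorem digit_char_cases (c : Char) (hc : c.isDigit = true) :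
    c = '0' ∨ c = '1' ∨ c = '2' ∨ c = '3' ∨ c = '4' ∨ c = '5' ∨ c = '6' ∨ c = '7' ∨
      c = '8' ∨ c = '9' := by
  simp [Char.isDigit] at hc
  obtain ⟨h1, h2⟩ := hc
  rcases c with ⟨v, hvlt⟩
  simp_all [Char.ext_iff, UInt32.le_iff_toNat_le, UInt32.ext_iff, UInt32.toNat_ofNat]
  omega

-- ofChars? on a pure digit string agrees with the digit-reader clone dvGo
theorem ofChars?_cons_digit (c : Char) (t : List Char) (hc : c.isDigit = true)
    (ht : ∀ d ∈ t, d.isDigit = true) :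
    PySem.Int.ofChars? (c :: t) = (dvGo (c :: t) false 0).map (fun n => (n : Int)) := by
  have hall : ∀ d ∈ c :: t, d.isDigit = true := by
    intro d hd; rcases List.mem_cons.mp hd with rfl | h2
    · exact hc
    · exact ht _ h2
  delta PySem.Int.ofChars?
  rw [dropWhile_eq_self_of_digits (c :: t) hall]
  rw [dropWhile_eq_self_of_digits ((c :: t).reverse)
    (by intro d hd; exact hall _ (List.mem_reverse.mp hd)), List.reverse_reverse]
  rcases digit_char_cases c hc with rfl | rfl | rfl | rfl | rfl | rfl | rfl | rfl | rfl | rfl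
  · conv => lhs; whnf
    congr 1
    show Option.bind _ _ = Option.bind _ _
    congr 1
    conv => lhs; whnf
    rw [show dvGo ('0' :: t) false 0 = dvGo t true (0 * 10 + ('0'.toNat - '0'.toNat)) from by
      simp [dvGo]]
    generalize hacc : 0 * 10 + ('0'.toNat - '0'.toNat) = a
    generalize htr : true = b
    clear hacc htr hall hc
    induction t generalizing b a with
    | nil => cases b <;> rfl
    | cons d t ih =>
      have hd : d.isDigit = true := ht d (by simp)
      have ht' : ∀ e ∈ t, e.isDigit = true := fun e he => ht e (by simp [he])
      conv => lhs; whnf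
      rw [hd]
      conv => lhs; whnf
      rw [show dvGo (d :: t) b a = dvGo t true (a * 10 + (d.toNat - '0'.toNat)) from by
        simp [dvGo, hd]]
      exact ih ht' _ _
  · conv => lhs; whnf
    congr 1
    show Option.bind _ _ = Option.bind _ _
    congr 1
    conv => lhs; whnf
    rw [show dvGo ('1' :: t) false 0 = dvGo t true (0 * 10 + ('1'.toNat - '0'.toNat)) from by
      simp [dvGo]]
    generalize hacc : 0 * 10 + ('1'.toNat - '0'.toNat) = a
    generalize htr : true = b
    clear hacc htr hall hc
    induction t generalizing b a with
    | nil => cases b <;> rfl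
    | cons d t ih =>
      have hd : d.isDigit = true := ht d (by simp)
      have ht' : ∀ e ∈ t, e.isDigit = true := fun e he => ht e (by simp [he])
      conv => lhs; whnf
      rw [hd]
      conv => lhs; whnf
      rw [show dvGo (d :: t) b a = dvGo t true (a * 10 + (d.toNat - '0'.toNat)) from by
        simp [dvGo, hd]]
      exact ih ht' _ _
  · conv => lhs; whnf
    congr 1
    show Option.bind _ _ = Option.bind _ _
    congr 1
    conv => lhs; whnf
    rw [show dvGo ('2' :: t) false 0 = dvGo t true (0 * 10 + ('2'.toNat - '0'.toNat)) from by
      simp [dvGo]]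
    generalize hacc : 0 * 10 + ('2'.toNat - '0'.toNat) = a
    generalize htr : true = b
    clear hacc htr hall hc
    induction t generalizing b a with
    | nil => cases b <;> rfl
    | cons d t ih =>
      have hd : d.isDigit = true := ht d (by simp)
      have ht' : ∀ e ∈ t, e.isDigit = true := fun e he => ht e (by simp [he])
      conv => lhs; whnf
      rw [hd]
      conv => lhs; whnf
      rw [show dvGo (d :: t) b a = dvGo t true (a * 10 + (d.toNat - '0'.toNat)) from by
        simp [dvGo, hd]]
      exact ih ht' _ _
  · conv => lhs; whnf
    congr 1
    show Option.bind _ _ = Option.bind _ _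
    congr 1
    conv => lhs; whnf
    rw [show dvGo ('3' :: t) false 0 = dvGo t true (0 * 10 + ('3'.toNat - '0'.toNat)) from by
      simp [dvGo]]
    generalize hacc : 0 * 10 + ('3'.toNat - '0'.toNat) = a
    generalize htr : true = b
    clear hacc htr hall hc
    induction t generalizing b a with
    | nil => cases b <;> rfl
    | cons d t ih =>
      have hd : d.isDigit = true := ht d (by simp)
      have ht' : ∀ e ∈ t, e.isDigit = true := fun e he => ht e (by simp [he])
      conv => lhs; whnf
      rw [hd]
      conv => lhs; whnf
      rw [show dvGo (d :: t) b a = dvGo t true (a * 10 + (d.toNat - '0'.toNat)) from by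
        simp [dvGo, hd]]
      exact ih ht' _ _
  · conv => lhs; whnf
    congr 1
    show Option.bind _ _ = Option.bind _ _
    congr 1
    conv => lhs; whnf
    rw [show dvGo ('4' :: t) false 0 = dvGo t true (0 * 10 + ('4'.toNat - '0'.toNat)) from by
      simp [dvGo]]
    generalize hacc : 0 * 10 + ('4'.toNat - '0'.toNat) = a
    generalize htr : true = b
    clear hacc htr hall hc
    induction t generalizing b a with
    | nil => cases b <;> rfl
    | cons d t ih =>
      have hd : d.isDigit = true := ht d (by simp)
      have ht' : ∀ e ∈ t, e.isDigit = true := fun e he => ht e (by simp [he])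
      conv => lhs; whnf
      rw [hd]
      conv => lhs; whnf
      rw [show dvGo (d :: t) b a = dvGo t true (a * 10 + (d.toNat - '0'.toNat)) from by
        simp [dvGo, hd]]
      exact ih ht' _ _
  · conv => lhs; whnf
    congr 1
    show Option.bind _ _ = Option.bind _ _
    congr 1
    conv => lhs; whnf
    rw [show dvGo ('5' :: t) false 0 = dvGo t true (0 * 10 + ('5'.toNat - '0'.toNat)) from by
      simp [dvGo]]
    generalize hacc : 0 * 10 + ('5'.toNat - '0'.toNat) = a
    generalize htr : true = b
    clear hacc htr hall hc
    induction t generalizing b a with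
    | nil => cases b <;> rfl
    | cons d t ih =>
      have hd : d.isDigit = true := ht d (by simp)
      have ht' : ∀ e ∈ t, e.isDigit = true := fun e he => ht e (by simp [he])
      conv => lhs; whnf
      rw [hd]
      conv => lhs; whnf
      rw [show dvGo (d :: t) b a = dvGo t true (a * 10 + (d.toNat - '0'.toNat)) from by
        simp [dvGo, hd]]
      exact ih ht' _ _
  · conv => lhs; whnf
    congr 1
    show Option.bind _ _ = Option.bind _ _
    congr 1
    conv => lhs; whnf
    rw [show dvGo ('6' :: t) false 0 = dvGo t true (0 * 10 + ('6'.toNat - '0'.toNat)) from by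
      simp [dvGo]]
    generalize hacc : 0 * 10 + ('6'.toNat - '0'.toNat) = a
    generalize htr : true = b
    clear hacc htr hall hc
    induction t generalizing b a with
    | nil => cases b <;> rfl
    | cons d t ih =>
      have hd : d.isDigit = true := ht d (by simp)
      have ht' : ∀ e ∈ t, e.isDigit = true := fun e he => ht e (by simp [he])
      conv => lhs; whnf
      rw [hd]
      conv => lhs; whnf
      rw [show dvGo (d :: t) b a = dvGo t true (a * 10 + (d.toNat - '0'.toNat)) from by
        simp [dvGo, hd]]
      exact ih ht' _ _
  · conv => lhs; whnf
    congr 1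
    show Option.bind _ _ = Option.bind _ _
    congr 1
    conv => lhs; whnf
    rw [show dvGo ('7' :: t) false 0 = dvGo t true (0 * 10 + ('7'.toNat - '0'.toNat)) from by
      simp [dvGo]]
    generalize hacc : 0 * 10 + ('7'.toNat - '0'.toNat) = a
    generalize htr : true = b
    clear hacc htr hall hc
    induction t generalizing b a with
    | nil => cases b <;> rfl
    | cons d t ih =>
      have hd : d.isDigit = true := ht d (by simp)
      have ht' : ∀ e ∈ t, e.isDigit = true := fun e he => ht e (by simp [he])
      conv => lhs; whnf
      rw [hd]
      conv => lhs; whnf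
      rw [show dvGo (d :: t) b a = dvGo t true (a * 10 + (d.toNat - '0'.toNat)) from by
        simp [dvGo, hd]]
      exact ih ht' _ _
  · conv => lhs; whnf
    congr 1
    show Option.bind _ _ = Option.bind _ _
    congr 1
    conv => lhs; whnf
    rw [show dvGo ('8' :: t) false 0 = dvGo t true (0 * 10 + ('8'.toNat - '0'.toNat)) from by
      simp [dvGo]]
    generalize hacc : 0 * 10 + ('8'.toNat - '0'.toNat) = a
    generalize htr : true = b
    clear hacc htr hall hc
    induction t generalizing b a with
    | nil => cases b <;> rfl
    | cons d t ih =>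
      have hd : d.isDigit = true := ht d (by simp)
      have ht' : ∀ e ∈ t, e.isDigit = true := fun e he => ht e (by simp [he])
      conv => lhs; whnf
      rw [hd]
      conv => lhs; whnf
      rw [show dvGo (d :: t) b a = dvGo t true (a * 10 + (d.toNat - '0'.toNat)) from by
        simp [dvGo, hd]]
      exact ih ht' _ _
  · conv => lhs; whnf
    congr 1
    show Option.bind _ _ = Option.bind _ _
    congr 1
    conv => lhs; whnf
    rw [show dvGo ('9' :: t) false 0 = dvGo t true (0 * 10 + ('9'.toNat - '0'.toNat)) from by
      simp [dvGo]]
    generalize hacc : 0 * 10 + ('9'.toNat - '0'.toNat) = a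
    generalize htr : true = b
    clear hacc htr hall hc
    induction t generalizing b a with
    | nil => cases b <;> rfl
    | cons d t ih =>
      have hd : d.isDigit = true := ht d (by simp)
      have ht' : ∀ e ∈ t, e.isDigit = true := fun e he => ht e (by simp [he])
      conv => lhs; whnf
      rw [hd]
      conv => lhs; whnf
      rw [show dvGo (d :: t) b a = dvGo t true (a * 10 + (d.toNat - '0'.toNat)) from by
        simp [dvGo, hd]]
      exact ih ht' _ _

theorem dvGo_true_digits : ∀ (ds : List Char) (a : Nat), (∀ c ∈ ds, c.isDigit = true) →
    dvGo ds true a = some (valFrom a ds) := by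
  intro ds
  induction ds with
  | nil => intro a _; simp [dvGo, valFrom]
  | cons c t ih =>
    intro a h
    have hc : c.isDigit = true := h c (by simp)
    rw [show dvGo (c :: t) true a = dvGo t true (a * 10 + (c.toNat - '0'.toNat)) from by
      simp [dvGo, hc]]
    rw [ih _ (fun d hd => h d (by simp [hd]))]
    rfl

theorem parse_digits (ds : List Char) (hne : ds ≠ []) (h : ∀ c ∈ ds, c.isDigit = true) :
    PySem.Int.ofChars? ds = some ((valFrom 0 ds : Nat) : Int) := by
  cases ds with
  | nil => exact absurd rfl hne
  | cons c t =>
    have hc : c.isDigit = true := h c (by simp)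
    have ht : ∀ d ∈ t, d.isDigit = true := fun d hd => h d (by simp [hd])
    rw [ofChars?_cons_digit c t hc ht]
    rw [show dvGo (c :: t) false 0 = dvGo t true (0 * 10 + (c.toNat - '0'.toNat)) from by
      simp [dvGo, hc]]
    rw [dvGo_true_digits t _ ht]
    rfl

-- ---- the two canonical halves ----
theorem decChars_ne_nil (m : Nat) : decChars m ≠ [] := by
  have := length_decChars_pos m
  intro hnil
  rw [hnil] at this
  simp at this

theorem spiltRights_div : ∀ m : Nat,
    spiltRights ((m / 10 : Nat) : Int) =
      (List.range ((decChars m).length - 1)).map (fun k => ((m / 10 ^ (k + 1) : Nat) : Int)) := by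
  intro m
  induction m using Nat.strong_induction_on with
  | _ m ih =>
    by_cases h : m < 10
    · have : m / 10 = 0 := Nat.div_eq_of_lt h
      rw [this, decChars_lt h]
      rw [spiltRights]
      simp
    · have h' : 10 ≤ m := Nat.not_lt.mp h
      have hpos : 0 < ((m / 10 : Nat) : Int) := by
        have : 1 ≤ m / 10 := by omega
        exact_mod_cast this
      rw [spiltRights, if_pos hpos]
      have hfd : PySem.Int.floordiv ((m / 10 : Nat) : Int) 10 = ((m / 10 / 10 : Nat) : Int) := by
        exact_mod_cast PySem.Int.floordiv_natCast (m / 10) 10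
      rw [hfd, ih (m / 10) (Nat.div_lt_self (by omega) (by norm_num))]
      rw [decChars_ge h']
      have hlen : (decChars (m / 10) ++ [Nat.digitChar (m % 10)]).length - 1
          = ((decChars (m / 10)).length - 1) + 1 := by
        have := length_decChars_pos (m / 10)
        simp
        omega
      rw [hlen, List.range_succ_eq_map, List.map_cons, List.map_map]
      refine List.cons_eq_cons.mpr ⟨by norm_num, ?_⟩
      apply List.map_congr_left
      intro k _
      simp only [Function.comp_apply, Nat.succ_eq_add_one]
      refine congrArg _ ?_
      rw [Nat.div_div_eq_div_mul]
      congr 1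
      rw [pow_succ]
      ring

theorem pyRange_countdown : ∀ L : Nat,
    PySem.List.pyRange (L : Int) 0 (-1) = (List.range L).map (fun b => ((L - b : Nat) : Int)) := by
  intro L
  rcases Nat.eq_zero_or_pos L with rfl | hL
  · simp [PySem.List.pyRange]
  · have hlt : (0 : Int) < (L : Int) := by exact_mod_cast hL
    rw [PySem.List.pyRange]
    rw [if_neg (by norm_num)]
    simp only [hlt, if_pos]
    rw [if_neg (by norm_num)]
    rw [show ((L : Int) - 0 + -(-1) - 1) / -(-1) = (L : Int) from by norm_num]
    rw [Int.toNat_natCast]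
    apply List.map_congr_left
    intro k hk
    rw [List.mem_range] at hk
    omega

theorem spilt_eq_canonical (n : Int) (h : 0 ≤ n) :
    spilt n =
      (List.range ((decChars n.toNat).length - 1)).map
        (fun k => ((n.toNat / 10 ^ (k + 1) : Nat) : Int)) ++
      (List.range (decChars n.toNat).length).map
        (fun b => ((n.toNat % 10 ^ ((decChars n.toNat).length - b) : Nat) : Int)) := by
  simp only [spilt]
  rw [toChars_eq_decChars n h, PySem.Chars.len_eq]
  rw [PySem.List.foldl_append_singleton_eq_map, PySem.List.foldl_append_singleton_eq_map]
  simp only [List.nil_append]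
  congr 1
  -- right-truncations
  · rw [PySem.List.pyRange_one 1 ((decChars n.toNat).length : Int)]
    rw [show (((decChars n.toNat).length : Int) - 1).toNat = (decChars n.toNat).length - 1 from
      by omega]
    rw [List.map_map]
    apply List.map_congr_left
    intro k hk
    rw [List.mem_range] at hk
    have hk' : k + 1 < (decChars n.toNat).length := by omega
    simp only [Function.comp_apply]
    rw [show ((decChars n.toNat).length : Int) - (1 + (k : Int))
        = (((decChars n.toNat).length - (k + 1) : Nat) : Int) from by omega]
    rw [PySem.List.slice_to_natCast]
    rw [take_decChars (k + 1) n.toNat hk']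
    rw [parse_digits _ (decChars_ne_nil _) (decChars_all_digit _)]
    rw [valFrom_decChars_zero]
    rfl
  -- left-truncations
  · rw [PySem.List.pyRange_one 0 ((decChars n.toNat).length : Int)]
    rw [show (((decChars n.toNat).length : Int) - 0).toNat = (decChars n.toNat).length from
      by omega]
    rw [List.map_map]
    apply List.map_congr_left
    intro k hk
    rw [List.mem_range] at hk
    simp only [Function.comp_apply]
    rw [show (0 : Int) + (k : Int) = ((k : Nat) : Int) from by omega]
    rw [PySem.List.slice_natCast]
    rw [List.take_of_length_le (by simp)]
    have hne : (decChars n.toNat).drop k ≠ [] := by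
      intro hnil
      have := congrArg List.length hnil
      simp at this
      omega
    rw [parse_digits _ hne
      (fun c hc => decChars_all_digit n.toNat c (List.mem_of_mem_drop hc))]
    rw [drop_valFrom n.toNat k hk]
    rfl

theorem spilt_alt_eq_canonical (n : Int) (h : 0 ≤ n) :
    spilt_alt n =
      (List.range ((decChars n.toNat).length - 1)).map
        (fun k => ((n.toNat / 10 ^ (k + 1) : Nat) : Int)) ++
      (List.range (decChars n.toNat).length).map
        (fun b => ((n.toNat % 10 ^ ((decChars n.toNat).length - b) : Nat) : Int)) := by
  have hn : n = ((n.toNat : Nat) : Int) := by omega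
  simp only [spilt_alt]
  rw [show PySem.Int.floordiv n 10 = ((n.toNat / 10 : Nat) : Int) from by
    rw [hn]; exact_mod_cast PySem.Int.floordiv_natCast n.toNat 10]
  rw [spiltRights_div n.toNat]
  congr 1
  have hlenmap : ((List.range ((decChars n.toNat).length - 1)).map
      (fun k => ((n.toNat / 10 ^ (k + 1) : Nat) : Int))).length
      = (decChars n.toNat).length - 1 := by simp
  rw [hlenmap]
  have hL1 : 1 ≤ (decChars n.toNat).length := length_decChars_pos n.toNat
  rw [show (((decChars n.toNat).length - 1 : Nat) : Int) + 1
      = ((decChars n.toNat).length : Nat) from by omega]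
  rw [pyRange_countdown]
  rw [List.map_map]
  apply List.map_congr_left
  intro b hb
  rw [List.mem_range] at hb
  simp only [Function.comp_apply, Int.toNat_natCast]
  rw [hn]
  simp only [Int.toNat_natCast]
  rw [show ((10 : Int) ^ ((decChars n.toNat).length - b))
      = (((10 ^ ((decChars n.toNat).length - b) : Nat)) : Int) from by push_cast; ring]
  exact_mod_cast PySem.Int.mod_natCast n.toNat (10 ^ ((decChars n.toNat).length - b))

-- ===== VERDICT (by name: the statement is the Claim_ definition above) =====
theorem spilt_spec : Claim_equal_spilt := by
  intro number _ hpre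
  unfold Spec_spilt
  rw [spilt_eq_canonical number hpre, spilt_alt_eq_canonical number hpre]
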